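-- pv_equiv track=rewrite | github.com/brianterry/Adversarial-IaC-Evaluation | src/tools/checkov_runner.py | _infer_vuln_type
-- ===== SOURCE A (Python) =====
-- def _infer_vuln_type(check_id: str, check_name: str, guideline: str) -> str:
--     """Infer vulnerability type from Checkov check details."""
--     # Handle None values safely
--     check_id = check_id or ""
--     check_name = check_name or ""
--     guideline = guideline or ""
--     text = f"{check_id} {check_name} {guideline}".lower()
--
--     if any(kw in text for kw in ["encrypt", "kms", "ssl", "tls", "https"]):
--         return "encryption"
--     elif any(kw in text for kw in ["public", "acl", "access", "exposed", "open"]):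
--         return "access_control"
--     elif any(kw in text for kw in ["security group", "firewall", "ingress", "egress", "cidr", "port", "vpc"]):
--         return "network"
--     elif any(kw in text for kw in ["iam", "role", "policy", "permission", "privilege", "assume"]):
--         return "iam"
--     elif any(kw in text for kw in ["log", "audit", "monitor", "trail", "metric", "cloudwatch"]):
--         return "logging"
--     elif any(kw in text for kw in ["backup", "version", "retention", "lifecycle", "recovery"]):
--         return "data_protection"
--     else:
--         return "configuration"
-- ===== SOURCE B (Python) =====
-- _RULES = [
--     ("encryption", ["encrypt", "kms", "ssl", "tls", "https"]),
--     ("access_control", ["public", "acl", "access", "exposed", "open"]),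
--     ("network", ["security group", "firewall", "ingress", "egress", "cidr", "port", "vpc"]),
--     ("iam", ["iam", "role", "policy", "permission", "privilege", "assume"]),
--     ("logging", ["log", "audit", "monitor", "trail", "metric", "cloudwatch"]),
--     ("data_protection", ["backup", "version", "retention", "lifecycle", "recovery"]),
-- ]
-- # keyword -> priority (index of its rule); keywords are pairwise distinct across rules
-- _KW = {kw: pri for pri, (_cat, kws) in enumerate(_RULES) for kw in kws}
--
--
-- def _infer_vuln_type(check_id: str, check_name: str, guideline: str) -> str:
--     """Infer vulnerability type from Checkov check details."""
--     check_id = check_id or ""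
--     check_name = check_name or ""
--     guideline = guideline or ""
--     text = f"{check_id} {check_name} {guideline}".lower()
--     pris = [pri for kw, pri in _KW.items() if kw in text]
--     if not pris:
--         return "configuration"
--     return _RULES[min(pris)][0]
-- ===== Notes on version B (the rewrite author's own statement) =====
-- stated objective: idiomatic
-- what changed: The fixed if/elif branch chain is replaced by a declarative rules table plus a keyword->priority map built once; the category is computed as the rule with the minimum priority among all matched keywords (correct because keyword priorities are scanned in rule order), with 'configuration' as the empty-match default.
import Mathlib
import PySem

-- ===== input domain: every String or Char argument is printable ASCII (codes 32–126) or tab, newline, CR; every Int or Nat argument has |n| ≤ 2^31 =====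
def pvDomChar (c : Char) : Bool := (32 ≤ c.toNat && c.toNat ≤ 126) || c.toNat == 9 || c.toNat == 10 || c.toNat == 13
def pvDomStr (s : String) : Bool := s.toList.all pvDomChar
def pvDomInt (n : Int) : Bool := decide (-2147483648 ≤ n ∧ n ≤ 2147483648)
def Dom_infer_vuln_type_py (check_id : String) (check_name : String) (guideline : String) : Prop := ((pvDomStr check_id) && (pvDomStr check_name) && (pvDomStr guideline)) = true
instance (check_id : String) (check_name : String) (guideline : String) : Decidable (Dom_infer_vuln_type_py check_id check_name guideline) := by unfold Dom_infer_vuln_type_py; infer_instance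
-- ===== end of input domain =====

-- B replaces A's fixed if/elif chain by a rules table with a keyword->priority map,
-- returning the minimum-priority matched rule (idiomatic, same cost).

-- ===== PORT A =====
def infer_vuln_type_py (check_id : String) (check_name : String) (guideline : String) : String :=
  let check_id := if check_id == "" then "" else check_id      -- `check_id or ""`
  let check_name := if check_name == "" then "" else check_name
  let guideline := if guideline == "" then "" else guideline
  let text : List Char :=
    PySem.Chars.lower (check_id.toList ++ ' ' :: check_name.toList ++ ' ' :: guideline.toList)
  if ["encrypt", "kms", "ssl", "tls", "https"].any (fun kw => PySem.Chars.isIn kw.toList text) then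
    "encryption"
  else if ["public", "acl", "access", "exposed", "open"].any (fun kw => PySem.Chars.isIn kw.toList text) then
    "access_control"
  else if ["security group", "firewall", "ingress", "egress", "cidr", "port", "vpc"].any (fun kw => PySem.Chars.isIn kw.toList text) then
    "network"
  else if ["iam", "role", "policy", "permission", "privilege", "assume"].any (fun kw => PySem.Chars.isIn kw.toList text) then
    "iam"
  else if ["log", "audit", "monitor", "trail", "metric", "cloudwatch"].any (fun kw => PySem.Chars.isIn kw.toList text) then
    "logging"
  else if ["backup", "version", "retention", "lifecycle", "recovery"].any (fun kw => PySem.Chars.isIn kw.toList text) then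
    "data_protection"
  else
    "configuration"

-- ===== PORT B =====
def rulesB : List (String × List String) :=
  [("encryption", ["encrypt", "kms", "ssl", "tls", "https"]),
   ("access_control", ["public", "acl", "access", "exposed", "open"]),
   ("network", ["security group", "firewall", "ingress", "egress", "cidr", "port", "vpc"]),
   ("iam", ["iam", "role", "policy", "permission", "privilege", "assume"]),
   ("logging", ["log", "audit", "monitor", "trail", "metric", "cloudwatch"]),
   ("data_protection", ["backup", "version", "retention", "lifecycle", "recovery"])]

-- _KW = {kw: pri for pri, (_cat, kws) in enumerate(_RULES) for kw in kws}
-- (keywords are pairwise distinct, so the dict is this association list)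
def kwB : List (String × Int) :=
  (PySem.List.enumerate rulesB 0).flatMap (fun p => p.2.2.map (fun kw => (kw, p.1)))

def infer_vuln_type_py_alt (check_id : String) (check_name : String) (guideline : String) : String :=
  let check_id := if check_id == "" then "" else check_id
  let check_name := if check_name == "" then "" else check_name
  let guideline := if guideline == "" then "" else guideline
  let text : List Char :=
    PySem.Chars.lower (check_id.toList ++ ' ' :: check_name.toList ++ ' ' :: guideline.toList)
  let pris : List Int := (kwB.filter (fun p => PySem.Chars.isIn p.1.toList text)).map Prod.snd
  match pris with
  | [] => "configuration"
  | h :: t => ((PySem.List.pyGet? rulesB (t.foldl min h)).getD ("", [])).1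

-- ===== PRECONDITION & SPEC =====
def Spec_infer_vuln_type_py (check_id : String) (check_name : String) (guideline : String) (out : String) : Prop := out = infer_vuln_type_py_alt check_id check_name guideline
instance (check_id : String) (check_name : String) (guideline : String) (out : String) : Decidable (Spec_infer_vuln_type_py check_id check_name guideline out) := by unfold Spec_infer_vuln_type_py; infer_instance

-- ===== CLAIM (what is proved, stated in full; the proofs are below) =====
def Claim_equal_infer_vuln_type_py : Prop := ∀ (check_id : String) (check_name : String) (guideline : String), Dom_infer_vuln_type_py check_id check_name guideline → Spec_infer_vuln_type_py check_id check_name guideline (infer_vuln_type_py check_id check_name guideline)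

-- ===== LEMMAS AND PROOFS =====

def prisOf (ps : List (String × Int)) (text : List Char) : List Int :=
  (ps.filter (fun p => PySem.Chars.isIn p.1.toList text)).map Prod.snd

def groupOf (kws : List String) (i : Int) : List (String × Int) :=
  kws.map (fun kw => (kw, i))

theorem kwB_eq : kwB =
    groupOf ["encrypt", "kms", "ssl", "tls", "https"] 0 ++
    groupOf ["public", "acl", "access", "exposed", "open"] 1 ++
    groupOf ["security group", "firewall", "ingress", "egress", "cidr", "port", "vpc"] 2 ++
    groupOf ["iam", "role", "policy", "permission", "privilege", "assume"] 3 ++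
    groupOf ["log", "audit", "monitor", "trail", "metric", "cloudwatch"] 4 ++
    groupOf ["backup", "version", "retention", "lifecycle", "recovery"] 5 := by
  rfl

theorem prisOf_append (a b : List (String × Int)) (t : List Char) :
    prisOf (a ++ b) t = prisOf a t ++ prisOf b t := by
  simp [prisOf, List.filter_append]

theorem prisOf_group (kws : List String) (i : Int) (t : List Char) :
    prisOf (groupOf kws i) t =
      List.replicate ((kws.filter (fun kw => PySem.Chars.isIn kw.toList t)).length) i := by
  induction kws with
  | nil => rfl
  | cons k ks ih =>
    simp only [groupOf, List.map_cons, prisOf, List.filter_cons] at *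
    by_cases h : PySem.Chars.isIn k.toList t = true <;> simp [h, ih, List.replicate_succ]

theorem foldl_min_eq (t : List Int) (x : Int) (h : ∀ y ∈ t, x ≤ y) : t.foldl min x = x := by
  induction t generalizing x with
  | nil => rfl
  | cons a l ih =>
    simp only [List.foldl_cons]
    rw [min_eq_left (h a (by simp))]
    exact ih x (fun y hy => h y (by simp [hy]))

-- B's core returns rule i when the matched-priority list starts with i and i is minimal
theorem alt_core_eq (pris : List Int) (i : Int) (rest : List Int)
    (h : pris = i :: rest) (hall : ∀ y ∈ rest, i ≤ y) (nm : String)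
    (hnm : ((PySem.List.pyGet? rulesB i).getD ("", [])).1 = nm) :
    (match pris with
     | [] => "configuration"
     | h :: t => ((PySem.List.pyGet? rulesB (t.foldl min h)).getD ("", [])).1) = nm := by
  subst h
  simpa [foldl_min_eq rest i hall] using hnm


theorem group_neg (kws : List String) (i : Int) (t : List Char)
    (h : kws.any (fun kw => PySem.Chars.isIn kw.toList t) = false) :
    prisOf (groupOf kws i) t = [] := by
  rw [prisOf_group]
  have hfil : (kws.filter (fun kw => PySem.Chars.isIn kw.toList t)) = [] := by
    rw [List.filter_eq_nil_iff]
    intro a ha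
    exact List.any_eq_false.mp h a ha
  simp [hfil]

theorem group_pos (kws : List String) (i : Int) (t : List Char)
    (h : kws.any (fun kw => PySem.Chars.isIn kw.toList t) = true) :
    ∃ n, prisOf (groupOf kws i) t = i :: List.replicate n i := by
  rw [prisOf_group]
  obtain ⟨a, ha, hp⟩ := List.any_eq_true.mp h
  have hne : (kws.filter (fun kw => PySem.Chars.isIn kw.toList t)) ≠ [] := by
    rw [Ne, List.filter_eq_nil_iff]
    exact fun hall => hall a ha hp
  obtain ⟨n, hn⟩ := Nat.exists_eq_succ_of_ne_zero (fun h0 => hne (List.length_eq_zero_iff.mp h0))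
  exact ⟨n, by rw [hn, List.replicate_succ]⟩

theorem mem_group (kws : List String) (i : Int) (t : List Char) (y : Int)
    (hy : y ∈ prisOf (groupOf kws i) t) : y = i := by
  rw [prisOf_group] at hy
  exact List.eq_of_mem_replicate hy

theorem core_eq (text : List Char) :
    (if ["encrypt", "kms", "ssl", "tls", "https"].any (fun kw => PySem.Chars.isIn kw.toList text) then
      "encryption"
    else if ["public", "acl", "access", "exposed", "open"].any (fun kw => PySem.Chars.isIn kw.toList text) then
      "access_control"
    else if ["security group", "firewall", "ingress", "egress", "cidr", "port", "vpc"].any (fun kw => PySem.Chars.isIn kw.toList text) then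
      "network"
    else if ["iam", "role", "policy", "permission", "privilege", "assume"].any (fun kw => PySem.Chars.isIn kw.toList text) then
      "iam"
    else if ["log", "audit", "monitor", "trail", "metric", "cloudwatch"].any (fun kw => PySem.Chars.isIn kw.toList text) then
      "logging"
    else if ["backup", "version", "retention", "lifecycle", "recovery"].any (fun kw => PySem.Chars.isIn kw.toList text) then
      "data_protection"
    else
      "configuration") =
    (match prisOf kwB text with
     | [] => "configuration"
     | h :: t => ((PySem.List.pyGet? rulesB (t.foldl min h)).getD ("", [])).1) := by
  have hsplit : prisOf kwB text =
      prisOf (groupOf ["encrypt", "kms", "ssl", "tls", "https"] 0) text ++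
      (prisOf (groupOf ["public", "acl", "access", "exposed", "open"] 1) text ++
      (prisOf (groupOf ["security group", "firewall", "ingress", "egress", "cidr", "port", "vpc"] 2) text ++
      (prisOf (groupOf ["iam", "role", "policy", "permission", "privilege", "assume"] 3) text ++
      (prisOf (groupOf ["log", "audit", "monitor", "trail", "metric", "cloudwatch"] 4) text ++
       prisOf (groupOf ["backup", "version", "retention", "lifecycle", "recovery"] 5) text)))) := by
    rw [kwB_eq]; simp [prisOf_append]
  by_cases h0 : ["encrypt", "kms", "ssl", "tls", "https"].any (fun kw => PySem.Chars.isIn kw.toList text) = true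
  · obtain ⟨n, hg⟩ := group_pos _ 0 text h0
    rw [hg] at hsplit
    rw [if_pos h0]
    rw [List.cons_append] at hsplit
    rw [hsplit]
    refine (alt_core_eq _ 0 _ rfl ?_ "encryption" (by rfl)).symm
    intro y hy
    simp only [List.mem_append, List.mem_replicate] at hy
    rcases hy with h | h | h | h | h | h
    · omega
    · rw [mem_group _ _ _ _ h]; omega
    · rw [mem_group _ _ _ _ h]; omega
    · rw [mem_group _ _ _ _ h]; omega
    · rw [mem_group _ _ _ _ h]; omega
    · rw [mem_group _ _ _ _ h]; omega
  · rw [group_neg _ 0 text (Bool.eq_false_iff.mpr h0), List.nil_append] at hsplit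
    rw [if_neg h0]
    by_cases h1 : ["public", "acl", "access", "exposed", "open"].any (fun kw => PySem.Chars.isIn kw.toList text) = true
    · obtain ⟨n, hg⟩ := group_pos _ 1 text h1
      rw [hg] at hsplit
      rw [if_pos h1]
      rw [List.cons_append] at hsplit
      rw [hsplit]
      refine (alt_core_eq _ 1 _ rfl ?_ "access_control" (by rfl)).symm
      intro y hy
      simp only [List.mem_append, List.mem_replicate] at hy
      rcases hy with h | h | h | h | h
      · omega
      · rw [mem_group _ _ _ _ h]; omega
      · rw [mem_group _ _ _ _ h]; omega
      · rw [mem_group _ _ _ _ h]; omega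
      · rw [mem_group _ _ _ _ h]; omega
    · rw [group_neg _ 1 text (Bool.eq_false_iff.mpr h1), List.nil_append] at hsplit
      rw [if_neg h1]
      by_cases h2 : ["security group", "firewall", "ingress", "egress", "cidr", "port", "vpc"].any (fun kw => PySem.Chars.isIn kw.toList text) = true
      · obtain ⟨n, hg⟩ := group_pos _ 2 text h2
        rw [hg] at hsplit
        rw [if_pos h2]
        rw [List.cons_append] at hsplit
        rw [hsplit]
        refine (alt_core_eq _ 2 _ rfl ?_ "network" (by rfl)).symm
        intro y hy
        simp only [List.mem_append, List.mem_replicate] at hy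
        rcases hy with h | h | h | h
        · omega
        · rw [mem_group _ _ _ _ h]; omega
        · rw [mem_group _ _ _ _ h]; omega
        · rw [mem_group _ _ _ _ h]; omega
      · rw [group_neg _ 2 text (Bool.eq_false_iff.mpr h2), List.nil_append] at hsplit
        rw [if_neg h2]
        by_cases h3 : ["iam", "role", "policy", "permission", "privilege", "assume"].any (fun kw => PySem.Chars.isIn kw.toList text) = true
        · obtain ⟨n, hg⟩ := group_pos _ 3 text h3
          rw [hg] at hsplit
          rw [if_pos h3]
          rw [List.cons_append] at hsplit
          rw [hsplit]
          refine (alt_core_eq _ 3 _ rfl ?_ "iam" (by rfl)).symm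
          intro y hy
          simp only [List.mem_append, List.mem_replicate] at hy
          rcases hy with h | h | h
          · omega
          · rw [mem_group _ _ _ _ h]; omega
          · rw [mem_group _ _ _ _ h]; omega
        · rw [group_neg _ 3 text (Bool.eq_false_iff.mpr h3), List.nil_append] at hsplit
          rw [if_neg h3]
          by_cases h4 : ["log", "audit", "monitor", "trail", "metric", "cloudwatch"].any (fun kw => PySem.Chars.isIn kw.toList text) = true
          · obtain ⟨n, hg⟩ := group_pos _ 4 text h4
            rw [hg] at hsplit
            rw [if_pos h4]
            rw [List.cons_append] at hsplit
            rw [hsplit]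
            refine (alt_core_eq _ 4 _ rfl ?_ "logging" (by rfl)).symm
            intro y hy
            simp only [List.mem_append, List.mem_replicate] at hy
            rcases hy with h | h
            · omega
            · rw [mem_group _ _ _ _ h]; omega
          · rw [group_neg _ 4 text (Bool.eq_false_iff.mpr h4), List.nil_append] at hsplit
            rw [if_neg h4]
            by_cases h5 : ["backup", "version", "retention", "lifecycle", "recovery"].any (fun kw => PySem.Chars.isIn kw.toList text) = true
            · obtain ⟨n, hg⟩ := group_pos _ 5 text h5
              rw [hg] at hsplit
              rw [if_pos h5]
              rw [hsplit]
              refine (alt_core_eq _ 5 _ rfl ?_ "data_protection" (by rfl)).symm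
              intro y hy
              simp only [List.mem_replicate] at hy
              omega
            · rw [group_neg _ 5 text (Bool.eq_false_iff.mpr h5)] at hsplit
              rw [if_neg h5]
              rw [hsplit]
-- ===== VERDICT (by name: the statement is the Claim_ definition above) =====
theorem infer_vuln_type_py_spec : Claim_equal_infer_vuln_type_py := by
  intro check_id check_name guideline _
  show infer_vuln_type_py check_id check_name guideline = infer_vuln_type_py_alt check_id check_name guideline
  exact core_eq _
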